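-- pv_equiv track=rewrite | github.com/shunya-tanaka-512/AtCoder | ABC085C/ABC085C.py | get_bill_combination
-- ===== SOURCE A (Python) =====
-- def get_bill_combination(num_of_bills: int, sum_total: int) -> list:
--     TEN_THOUSAND = 10000
--     FIVE_THOUSAND = 5000
--     THOUSAND = 1000
--     # 初期値をsum_total円があり得ない場合の-1 -1 -1とする
--     yen10000_num, yen5000_num, yen1000_num = [-1, -1, -1]
--     for i in range(num_of_bills + 1):
--         for j in range(num_of_bills - i + 1):  # 一万円の枚数引いた回数
--             if (
--                 TEN_THOUSAND * i
--                 + FIVE_THOUSAND * j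
--                 + THOUSAND * (num_of_bills - i - j)  # 一万円と五千円引いた枚数=千円の枚数
--                 == sum_total
--             ):
--                 yen10000_num, yen5000_num, yen1000_num = [i, j, num_of_bills - i - j]
--     return [yen10000_num, yen5000_num, yen1000_num]
-- ===== SOURCE B (Python) =====
-- def get_bill_combination(num_of_bills: int, sum_total: int) -> list:
--     # O(n): for each count i of 10000-yen bills, solve the linear equation
--     # 10000*i + 5000*j + 1000*(n-i-j) = total  =>  4000*j = total - 1000*n - 9000*i
--     result = [-1, -1, -1]
--     for i in range(num_of_bills + 1):
--         r = sum_total - 1000 * num_of_bills - 9000 * i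
--         if r >= 0 and r % 4000 == 0:
--             j = r // 4000
--             if j <= num_of_bills - i:
--                 result = [i, j, num_of_bills - i - j]
--     return result
-- ===== Notes on version B (the rewrite author's own statement) =====
-- stated objective: faster
-- what changed: The inner brute-force loop over the 5000-yen count j is replaced by solving the linear equation 4000*j = total - 1000*n - 9000*i directly for each i, turning the nested O(n^2) scan into a single O(n) loop.
import Mathlib
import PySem

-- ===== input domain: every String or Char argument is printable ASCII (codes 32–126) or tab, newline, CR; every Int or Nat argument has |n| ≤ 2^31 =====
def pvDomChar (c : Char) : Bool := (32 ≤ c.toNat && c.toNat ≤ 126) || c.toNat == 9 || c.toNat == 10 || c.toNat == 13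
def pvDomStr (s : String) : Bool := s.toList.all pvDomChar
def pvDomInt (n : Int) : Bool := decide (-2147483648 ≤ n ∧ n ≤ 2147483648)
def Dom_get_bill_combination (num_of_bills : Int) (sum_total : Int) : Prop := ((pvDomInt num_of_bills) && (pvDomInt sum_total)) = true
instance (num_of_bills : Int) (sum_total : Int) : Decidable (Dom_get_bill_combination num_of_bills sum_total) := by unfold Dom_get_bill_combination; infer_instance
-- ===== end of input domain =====

-- B replaces A's inner brute-force loop over j by solving the linear equation
-- 4000*j = total - 1000*n - 9000*i directly for each i (O(n^2) → O(n)).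

-- ===== PORT A =====
def get_bill_combination (num_of_bills : Int) (sum_total : Int) : List Int :=
  let st :=
    (PySem.List.pyRange 0 (num_of_bills + 1) 1).foldl
      (fun st i =>
        (PySem.List.pyRange 0 (num_of_bills - i + 1) 1).foldl
          (fun st j =>
            if 10000 * i + 5000 * j + 1000 * (num_of_bills - i - j) = sum_total then
              (i, j, num_of_bills - i - j)
            else st) st)
      (-1, -1, -1)
  [st.1, st.2.1, st.2.2]

-- ===== PORT B =====
def get_bill_combination_alt (num_of_bills : Int) (sum_total : Int) : List Int :=
  (PySem.List.pyRange 0 (num_of_bills + 1) 1).foldl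
    (fun result i =>
      let r := sum_total - 1000 * num_of_bills - 9000 * i
      if r ≥ 0 ∧ PySem.Int.mod r 4000 = 0 then
        let j := PySem.Int.floordiv r 4000
        if j ≤ num_of_bills - i then [i, j, num_of_bills - i - j] else result
      else result)
    [-1, -1, -1]

-- ===== PRECONDITION & SPEC =====
def Spec_get_bill_combination (num_of_bills : Int) (sum_total : Int) (out : List Int) : Prop := out = get_bill_combination_alt num_of_bills sum_total
instance (num_of_bills : Int) (sum_total : Int) (out : List Int) : Decidable (Spec_get_bill_combination num_of_bills sum_total out) := by unfold Spec_get_bill_combination; infer_instance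

-- ===== CLAIM (what is proved, stated in full; the proofs are below) =====
def Claim_equal_get_bill_combination : Prop := ∀ (num_of_bills : Int) (sum_total : Int), Dom_get_bill_combination num_of_bills sum_total → Spec_get_bill_combination num_of_bills sum_total (get_bill_combination num_of_bills sum_total)

-- ===== LEMMAS AND PROOFS =====

-- A's inner loop over j keeps at most the unique solution of 4000*j = r, j ∈ [0, k].
lemma loop_core_nat {α : Type} (r : Int) (g : Int → α) (st : α) (k : Nat) :
    (PySem.List.pyRange 0 ((k : Int) + 1) 1).foldl
      (fun st j => if 4000 * j = r then g j else st) st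
    = if 0 ≤ r ∧ r % 4000 = 0 ∧ r / 4000 ≤ (k : Int) then g (r / 4000) else st := by
  induction k with
  | zero =>
    rw [show ((0 : Nat) : Int) + 1 = 0 + 1 from by norm_num, PySem.List.pyRange_one_singleton]
    simp only [List.foldl_cons, List.foldl_nil]
    by_cases h : 4000 * (0 : Int) = r
    · rw [if_pos h, if_pos (by omega), show r / 4000 = 0 from by omega]
    · rw [if_neg h, if_neg (by omega)]
  | succ k ih =>
    rw [show ((k + 1 : Nat) : Int) + 1 = ((k : Int) + 1) + 1 from by push_cast; ring,
        PySem.List.pyRange_one_succ_right (by omega), List.foldl_append]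
    simp only [List.foldl_cons, List.foldl_nil]
    rw [ih]
    by_cases h : 4000 * ((k : Int) + 1) = r
    · rw [if_pos h, if_pos (by omega), show r / 4000 = (k : Int) + 1 from by omega]
    · rw [if_neg h]
      by_cases h2 : 0 ≤ r ∧ r % 4000 = 0 ∧ r / 4000 ≤ (k : Int)
      · rw [if_pos h2, if_pos (by omega)]
      · rw [if_neg h2, if_neg (by omega)]

lemma loop_core {α : Type} (r : Int) (g : Int → α) (st : α) (m : Int) :
    (PySem.List.pyRange 0 (m + 1) 1).foldl
      (fun st j => if 4000 * j = r then g j else st) st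
    = if 0 ≤ r ∧ r % 4000 = 0 ∧ r / 4000 ≤ m then g (r / 4000) else st := by
  rcases le_or_gt 0 m with hm | hm
  · obtain ⟨k, rfl⟩ := Int.eq_ofNat_of_zero_le hm
    exact loop_core_nat r g st k
  · rw [PySem.List.pyRange_one_eq_nil (by omega), List.foldl_nil, if_neg (by omega)]

-- A's inner loop, characterised.
lemma inner_loop (n S i : Int) (st : Int × Int × Int) :
    (PySem.List.pyRange 0 (n - i + 1) 1).foldl
      (fun st j =>
        if 10000 * i + 5000 * j + 1000 * (n - i - j) = S then (i, j, n - i - j) else st) st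
    = if 0 ≤ S - 1000 * n - 9000 * i ∧ (S - 1000 * n - 9000 * i) % 4000 = 0 ∧
          (S - 1000 * n - 9000 * i) / 4000 ≤ n - i
      then (i, (S - 1000 * n - 9000 * i) / 4000, n - i - (S - 1000 * n - 9000 * i) / 4000)
      else st := by
  have hc : ∀ j : Int,
      (10000 * i + 5000 * j + 1000 * (n - i - j) = S) ↔ (4000 * j = S - 1000 * n - 9000 * i) := by
    intro j; omega
  simp only [hc]
  exact loop_core (S - 1000 * n - 9000 * i) (fun j => (i, j, n - i - j)) st (n - i)

-- Both loops over the same range, related by projecting A's triple state to B's list state.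
lemma main_fold (n S : Int) (L : List Int) (st : Int × Int × Int) :
    (let t := L.foldl
        (fun st i =>
          (PySem.List.pyRange 0 (n - i + 1) 1).foldl
            (fun st j =>
              if 10000 * i + 5000 * j + 1000 * (n - i - j) = S then (i, j, n - i - j) else st) st)
        st
     [t.1, t.2.1, t.2.2])
    = L.foldl
        (fun result i =>
          let r := S - 1000 * n - 9000 * i
          if r ≥ 0 ∧ PySem.Int.mod r 4000 = 0 then
            let j := PySem.Int.floordiv r 4000
            if j ≤ n - i then [i, j, n - i - j] else result
          else result)
        [st.1, st.2.1, st.2.2] := by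
  induction L generalizing st with
  | nil => rfl
  | cons i L ih =>
    simp only [List.foldl_cons]
    rw [inner_loop,
        PySem.Int.mod_eq_emod_of_pos (a := S - 1000 * n - 9000 * i) (by norm_num),
        PySem.Int.floordiv_eq_ediv_of_pos (a := S - 1000 * n - 9000 * i) (by norm_num)]
    by_cases h1 : (0 : Int) ≤ S - 1000 * n - 9000 * i ∧ (S - 1000 * n - 9000 * i) % 4000 = 0
    · by_cases h2 : (S - 1000 * n - 9000 * i) / 4000 ≤ n - i
      · rw [if_pos ⟨h1.1, h1.2, h2⟩, if_pos ⟨h1.1, h1.2⟩, if_pos h2, ih]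
      · rw [if_neg (by tauto), if_pos ⟨h1.1, h1.2⟩, if_neg h2, ih]
    · rw [if_neg (by tauto), if_neg (by tauto), ih]

-- ===== VERDICT (by name: the statement is the Claim_ definition above) =====
theorem get_bill_combination_spec : Claim_equal_get_bill_combination := by
  intro n S _
  unfold Spec_get_bill_combination get_bill_combination get_bill_combination_alt
  exact main_fold n S (PySem.List.pyRange 0 (n + 1) 1) (-1, -1, -1)
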